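-- pv_equiv track=rewrite | github.com/LunarCoreCreative/Luna | test_edit_logic.py | new_structural_edit
-- ===== SOURCE A (Python) =====
-- def new_structural_edit(content, search_block, replace_block):
--     content_norm = content.replace("\r\n", "\n")
--     search_norm = search_block.replace("\r\n", "\n")
--
--     # 0. Precise Match
--     if search_norm in content_norm:
--          return content_norm.replace(search_norm, replace_block)
--
--     # 1. Structural Match (Indentation/Whitespace agnostic)
--     content_lines = content_norm.split('\n')
--
--     # Map non-empty lines to their original indices
--     # (index_in_original_list, content_of_line_stripped)
--     non_empty_map = []
--     for i, line in enumerate(content_lines):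
--         if line.strip():
--             non_empty_map.append((i, line.strip()))
--
--     search_lines_stripped = [line.strip() for line in search_norm.split('\n') if line.strip()]
--
--     if not search_lines_stripped:
--         return None # Empty search block??
--
--     # List of stripped content lines
--     content_stripped = [x[1] for x in non_empty_map]
--
--     # Search for subsequence
--     n = len(search_lines_stripped)
--     m = len(content_stripped)
--
--     if n == 0: return None
--
--     found_start_idx = -1
--
--     for i in range(m - n + 1):
--         if content_stripped[i : i + n] == search_lines_stripped:
--             found_start_idx = i
--             break
--
--     if found_start_idx != -1:
--         # Found match in stripped lines!
--         # Map back to original lines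
--         start_mapping = non_empty_map[found_start_idx]     # (original_idx, content)
--         end_mapping = non_empty_map[found_start_idx + n - 1] # (original_idx, content)
--
--         orig_start_line = start_mapping[0]
--         orig_end_line = end_mapping[0]
--
--         # Replace the range in original lines
--         # Note: This blindly replaces everything between the first and last matched non-empty line
--         # including any intermediate empty lines that might differ. This is usually what we want.
--
--         new_lines = content_lines[:orig_start_line] + [replace_block] + content_lines[orig_end_line+1:]
--         return "\n".join(new_lines)
--
--     return None
-- ===== SOURCE B (Python) =====
-- def new_structural_edit(content, search_block, replace_block):
--     content_norm = content.replace("\r\n", "\n")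
--     search_norm = search_block.replace("\r\n", "\n")
--
--     # 0. Precise match (all occurrences), as in the original.
--     if search_norm in content_norm:
--         return content_norm.replace(search_norm, replace_block)
--
--     # 1. Structural match by Knuth-Morris-Pratt over the stripped non-empty
--     # lines: a precomputed failure function and one pass, instead of
--     # comparing a window of n lines at every start position.
--     lines = content_norm.split('\n')
--     pairs = [(i, l.strip()) for i, l in enumerate(lines) if l.strip()]
--     pat = [l.strip() for l in search_norm.split('\n') if l.strip()]
--     if not pat:
--         return None
--     n = len(pat)
--
--     # fail[j] = length of the longest proper border of pat[:j+1]
--     fail = [0]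
--     k = 0
--     for j in range(1, n):
--         while k > 0 and pat[j] != pat[k]:
--             k = fail[k - 1]
--         if pat[j] == pat[k]:
--             k += 1
--         fail.append(k)
--
--     # linear scan: j = length of longest prefix of pat that is a suffix of
--     # the stripped lines seen so far
--     j = 0
--     for t, (orig, line) in enumerate(pairs):
--         while j > 0 and line != pat[j]:
--             j = fail[j - 1]
--         if line == pat[j]:
--             j += 1
--         if j == n:
--             start = pairs[t + 1 - n][0]
--             return "\n".join(lines[:start] + [replace_block] + lines[orig + 1:])
--     return None
-- ===== Notes on version B (the rewrite author's own statement) =====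
-- stated objective: alternative
-- what changed: Replaces A's sliding-window subsequence search (re-comparing an n-line slice at every start position) by Knuth-Morris-Pratt matching over the stripped non-empty lines: a precomputed failure function and one linear pass, O(m+n) line comparisons instead of O(m*n).
import Mathlib
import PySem

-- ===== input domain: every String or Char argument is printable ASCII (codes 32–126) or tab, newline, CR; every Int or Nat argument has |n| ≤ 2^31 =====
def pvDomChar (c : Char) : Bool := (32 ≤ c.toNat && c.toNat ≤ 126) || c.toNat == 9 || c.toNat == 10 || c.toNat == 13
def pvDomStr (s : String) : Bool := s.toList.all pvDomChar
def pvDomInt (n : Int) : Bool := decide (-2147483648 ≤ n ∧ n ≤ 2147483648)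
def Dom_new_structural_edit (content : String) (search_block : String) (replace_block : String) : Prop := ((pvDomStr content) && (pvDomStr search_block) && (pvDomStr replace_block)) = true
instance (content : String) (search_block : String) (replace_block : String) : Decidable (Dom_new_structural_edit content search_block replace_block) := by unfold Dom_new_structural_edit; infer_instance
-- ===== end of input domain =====

-- B replaces A's sliding-window scan over the stripped non-empty lines by
-- Knuth-Morris-Pratt matching (precomputed failure function, one pass) (alternative).

-- ===== PORT A =====
-- s.split('\n'): Str.split? is `some` for the non-empty separator "\n"; `.getD []` only totalizes.
def pvSplitNL (s : String) : List String := (PySem.Str.split? s "\n").getD []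

-- A's `for i in range(m - n + 1): if content_stripped[i:i+n] == search: found = i; break`
def pvAGo (cs pat : List String) (n : Int) : List Int → Int
  | [] => -1
  | i :: rest =>
    if PySem.List.slice cs (some i) (some (i + n)) = pat then i else pvAGo cs pat n rest

def new_structural_edit (content : String) (search_block : String) (replace_block : String) : Option String :=
  let content_norm := PySem.Str.replace content "\r\n" "\n"
  let search_norm := PySem.Str.replace search_block "\r\n" "\n"
  if PySem.Str.isIn search_norm content_norm then
    some (PySem.Str.replace content_norm search_norm replace_block)
  else
    let content_lines := pvSplitNL content_norm
    let non_empty_map := (PySem.List.enumerate content_lines).foldl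
      (fun acc p => if !(PySem.Str.strip p.2 == "") then acc ++ [(p.1, PySem.Str.strip p.2)] else acc) []
    let search_lines_stripped :=
      ((pvSplitNL search_norm).filter (fun l => !(PySem.Str.strip l == ""))).map PySem.Str.strip
    if search_lines_stripped = [] then none
    else
      let content_stripped := non_empty_map.map (·.2)
      let n := PySem.List.len search_lines_stripped
      let m := PySem.List.len content_stripped
      if n = 0 then none
      else
        let found := pvAGo content_stripped search_lines_stripped n (PySem.List.pyRange 0 (m - n + 1) 1)
        if found ≠ -1 then
          let start_mapping := PySem.List.pyGetD non_empty_map found (0, "")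
          let end_mapping := PySem.List.pyGetD non_empty_map (found + n - 1) (0, "")
          some (PySem.Str.join "\n"
            (PySem.List.slice content_lines none (some start_mapping.1) ++ [replace_block] ++
             PySem.List.slice content_lines (some (end_mapping.1 + 1)) none))
        else none

-- ===== PORT B =====
-- Source B's `while j > 0 and line != pat[j]: j = fail[j-1]`; the fuel argument (the loop
-- visits a strictly decreasing chain starting at j, so fuel = j suffices) only totalizes.
def kmpFall (pat : List String) (fail : List Nat) (c : String) : Nat → Nat → Nat
  | 0, j => j
  | fuel + 1, j =>
    if 0 < j ∧ ¬(c = pat.getD j "") then kmpFall pat fail c fuel (fail.getD (j - 1) 0) else j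

-- Source B's `for j in range(1, n): … fail.append(k)` (state: fail list built so far, k)
def kmpBuildGo (pat : List String) (fl : List Nat) (k j : Nat) : List Nat :=
  if _h : j < pat.length then
    let k1 := kmpFall pat fl (pat.getD j "") k k
    let k2 := if pat.getD j "" = pat.getD k1 "" then k1 + 1 else k1
    kmpBuildGo pat (fl ++ [k2]) k2 (j + 1)
  else fl
termination_by pat.length - j

-- Source B's scan loop `for t, (orig, line) in enumerate(pairs): …`; returns the located
-- span (original start line, original end line) instead of returning the join in-loop.
def kmpScanGo (pat : List String) (fail : List Nat) (allPairs : List (Int × String)) :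
    List (Int × String) → Nat → Nat → Option (Int × Int)
  | [], _, _ => none
  | (orig, line) :: rest, t, j =>
    let j1 := kmpFall pat fail line j j
    let j2 := if line = pat.getD j1 "" then j1 + 1 else j1
    if j2 = pat.length then some ((allPairs.getD (t + 1 - pat.length) (0, "")).1, orig)
    else kmpScanGo pat fail allPairs rest (t + 1) j2

def new_structural_edit_alt (content : String) (search_block : String) (replace_block : String) : Option String :=
  let content_norm := PySem.Str.replace content "\r\n" "\n"
  let search_norm := PySem.Str.replace search_block "\r\n" "\n"
  if PySem.Str.isIn search_norm content_norm then
    some (PySem.Str.replace content_norm search_norm replace_block)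
  else
    let content_lines := pvSplitNL content_norm
    let pairs := ((PySem.List.enumerate content_lines).filter
        (fun p => !(PySem.Str.strip p.2 == ""))).map (fun p => (p.1, PySem.Str.strip p.2))
    let pattern :=
      ((pvSplitNL search_norm).filter (fun l => !(PySem.Str.strip l == ""))).map PySem.Str.strip
    if pattern = [] then none
    else
      let fail := kmpBuildGo pattern [0] 0 1
      match kmpScanGo pattern fail pairs pairs 0 0 with
      | some (s, e) =>
        some (PySem.Str.join "\n"
          (PySem.List.slice content_lines none (some s) ++ [replace_block] ++
           PySem.List.slice content_lines (some (e + 1)) none))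
      | none => none

-- ===== PRECONDITION & SPEC =====
def Spec_new_structural_edit (content : String) (search_block : String) (replace_block : String) (out : Option String) : Prop := out = new_structural_edit_alt content search_block replace_block
instance (content : String) (search_block : String) (replace_block : String) (out : Option String) : Decidable (Spec_new_structural_edit content search_block replace_block out) := by unfold Spec_new_structural_edit; infer_instance

-- ===== CLAIM (what is proved, stated in full; the proofs are below) =====
def Claim_equal_new_structural_edit : Prop := ∀ (content : String) (search_block : String) (replace_block : String), Dom_new_structural_edit content search_block replace_block → Spec_new_structural_edit content search_block replace_block (new_structural_edit content search_block replace_block)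

-- ===== LEMMAS AND PROOFS =====

-- fail.getD (i-1) 0 is the longest-proper-border length of pat.take i, for 1 ≤ i ≤ J
def pvFailSpec (p : List String) (j : Nat) : Nat :=
  Nat.findGreatest (fun k => p.take k <:+ p.take j) (j - 1)

def pvFInv (p : List String) (fail : List Nat) (J : Nat) : Prop :=
  ∀ i, 1 ≤ i → i ≤ J → fail.getD (i - 1) 0 = pvFailSpec p i

-- first index at which pat occurs as a prefix of a tail of t
def pvFirstOcc (p t : List String) : Option Nat :=
  (List.range (t.length + 1)).find? (fun i => decide (p <+: t.drop i))

-- the scan-loop invariant: j is the longest prefix of p that is a suffix of the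
-- processed stripped lines T, no full occurrence of p lies inside T, and j < |p|
def pvScanInv (p T : List String) (j : Nat) : Prop :=
  j < p.length ∧ p.take j <:+ T ∧
  (∀ k, k ≤ p.length → p.take k <:+ T → k ≤ j) ∧
  (∀ i, i + p.length ≤ T.length → ¬ p <+: T.drop i)

lemma pvTakeSucc (p : List String) (k : Nat) (hk : k < p.length) :
    p.take (k + 1) = p.take k ++ [p.getD k ""] := by
  rw [List.take_add_one, List.getElem?_eq_getElem hk, List.getD_eq_getElem?_getD,
    List.getElem?_eq_getElem hk]
  rfl

lemma pvSuffixSnocSnoc (a b : List String) (x y : String) (h : a ++ [x] <:+ b ++ [y]) :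
    x = y ∧ a <:+ b := by
  rw [← List.reverse_prefix] at h
  simp only [List.reverse_append, List.reverse_cons, List.reverse_nil, List.nil_append,
    List.singleton_append, List.cons_prefix_cons] at h
  exact ⟨h.1, List.reverse_prefix.mp h.2⟩

lemma pvSnocSuffixSnoc (a b : List String) (x : String) (h : a <:+ b) :
    a ++ [x] <:+ b ++ [x] := by
  obtain ⟨u, rfl⟩ := h
  exact ⟨u, by simp⟩

lemma pvFailSpec_lt (p : List String) (j : Nat) (hj : 1 ≤ j) : pvFailSpec p j < j :=
  lt_of_le_of_lt (Nat.findGreatest_le _) (by omega)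

lemma pvFailSpec_suffix (p : List String) (j : Nat) :
    p.take (pvFailSpec p j) <:+ p.take j :=
  Nat.findGreatest_spec (P := fun k => p.take k <:+ p.take j) (Nat.zero_le _)
    (by simp)

lemma pvLe_failSpec (p : List String) (j k : Nat) (hk : k < j) (h : p.take k <:+ p.take j) :
    k ≤ pvFailSpec p j :=
  Nat.le_findGreatest (by omega) h

lemma pvChain (p : List String) (j k : Nat) (hjn : j ≤ p.length) (hk : k < j)
    (h : p.take k <:+ p.take j) : p.take k <:+ p.take (pvFailSpec p j) := by
  apply List.suffix_of_suffix_length_le h (pvFailSpec_suffix p j)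
  rw [List.length_take, List.length_take]
  have h1 := pvLe_failSpec p j k hk h
  omega

lemma pvFInv_mono (p : List String) (fail : List Nat) (J J' : Nat) (h : pvFInv p fail J)
    (hle : J' ≤ J) : pvFInv p fail J' :=
  fun i h1 h2 => h i h1 (le_trans h2 hle)

lemma pvKmpFall_spec (p : List String) (fail : List Nat) (c : String) (fuel s : Nat)
    (hfuel : s ≤ fuel) (hs : s ≤ p.length) (hF : pvFInv p fail s) :
    kmpFall p fail c fuel s ≤ s ∧
    p.take (kmpFall p fail c fuel s) <:+ p.take s ∧
    (kmpFall p fail c fuel s = 0 ∨ c = p.getD (kmpFall p fail c fuel s) "") ∧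
    (∀ k, k ≤ s → p.take k <:+ p.take s → c = p.getD k "" → k ≤ kmpFall p fail c fuel s) := by
  induction fuel generalizing s with
  | zero =>
    have hs0 : s = 0 := by omega
    subst hs0
    exact ⟨le_refl _, List.suffix_refl _, Or.inl rfl, fun k hk _ _ => hk⟩
  | succ fuel ih =>
    simp only [kmpFall]
    by_cases h : 0 < s ∧ ¬(c = p.getD s "")
    · rw [if_pos h]
      have hfl : fail.getD (s - 1) 0 = pvFailSpec p s := hF s (by omega) (le_refl _)
      rw [hfl]
      have hflt : pvFailSpec p s < s := pvFailSpec_lt p s (by omega)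
      obtain ⟨h1, h2, h3, h4⟩ := ih (pvFailSpec p s) (by omega) (by omega)
        (pvFInv_mono p fail s _ hF (by omega))
      refine ⟨by omega, h2.trans (pvFailSpec_suffix p s), h3, ?_⟩
      intro k hk hsuf hc
      rcases Nat.lt_or_ge k s with hlt | hge
      · exact h4 k (pvLe_failSpec p s k hlt hsuf) (pvChain p s k hs hlt hsuf) hc
      · have hks : k = s := le_antisymm hk hge
        exact absurd (hks ▸ hc) h.2
    · rw [if_neg h]
      refine ⟨le_refl _, List.suffix_refl _, ?_, fun k hk _ _ => hk⟩
      by_cases h0 : s = 0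
      · exact Or.inl h0
      · exact Or.inr (by by_contra hc; exact h ⟨by omega, hc⟩)

-- the combined fall-then-extend step computes the longest k with p.take k <:+ T ++ [c]
lemma pvStep_spec (p : List String) (fail : List Nat) (c : String) (T : List String) (j : Nat)
    (hj : j < p.length) (hF : pvFInv p fail j)
    (hsuf : p.take j <:+ T) (hmax : ∀ k, k ≤ p.length → p.take k <:+ T → k ≤ j) :
    (if c = p.getD (kmpFall p fail c j j) "" then kmpFall p fail c j j + 1
      else kmpFall p fail c j j) ≤ p.length ∧
    p.take (if c = p.getD (kmpFall p fail c j j) "" then kmpFall p fail c j j + 1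
      else kmpFall p fail c j j) <:+ T ++ [c] ∧
    (∀ k, k ≤ p.length → p.take k <:+ T ++ [c] →
      k ≤ (if c = p.getD (kmpFall p fail c j j) "" then kmpFall p fail c j j + 1
        else kmpFall p fail c j j)) := by
  obtain ⟨h1, h2, h3, h4⟩ := pvKmpFall_spec p fail c j j (le_refl _) (by omega) hF
  set r := kmpFall p fail c j j with hr
  refine ⟨?_, ?_, ?_⟩
  · split_ifs <;> omega
  · by_cases hc : c = p.getD r ""
    · rw [if_pos hc, pvTakeSucc p r (by omega), ← hc]
      exact pvSnocSuffixSnoc _ _ _ (h2.trans hsuf)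
    · rw [if_neg hc]
      have hr0 : r = 0 := h3.resolve_right hc
      rw [hr0, List.take_zero]
      exact List.nil_suffix
  · intro k hk hsufk
    cases k with
    | zero => exact Nat.zero_le _
    | succ k' =>
      rw [pvTakeSucc p k' (by omega)] at hsufk
      obtain ⟨hck', hsufk'⟩ := pvSuffixSnocSnoc _ _ _ _ hsufk
      have hk'j : k' ≤ j := hmax k' (by omega) hsufk'
      have hsk : p.take k' <:+ p.take j := by
        apply List.suffix_of_suffix_length_le hsufk' hsuf
        rw [List.length_take, List.length_take]
        omega
      have hk'r : k' ≤ r := h4 k' hk'j hsk hck'.symm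
      by_cases hc : c = p.getD r ""
      · rw [if_pos hc]; omega
      · rw [if_neg hc]
        have hr0 : r = 0 := h3.resolve_right hc
        exact absurd (by rw [hr0, ← (by omega : k' = 0)]; exact hck'.symm) hc

lemma pvBuild_step (p : List String) (j : Nat) (fl : List Nat) (hj : 1 ≤ j) (hjn : j < p.length)
    (hF : pvFInv p fl j) :
    (if p.getD j "" = p.getD (kmpFall p fl (p.getD j "") (pvFailSpec p j) (pvFailSpec p j)) ""
      then kmpFall p fl (p.getD j "") (pvFailSpec p j) (pvFailSpec p j) + 1
      else kmpFall p fl (p.getD j "") (pvFailSpec p j) (pvFailSpec p j)) = pvFailSpec p (j + 1) := by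
  set c := p.getD j "" with hc_def
  set f := pvFailSpec p j with hf
  have hflt : f < j := pvFailSpec_lt p j hj
  obtain ⟨h1, h2, h3, h4⟩ := pvKmpFall_spec p fl c f f (le_refl _) (by omega)
    (pvFInv_mono p fl j f hF (by omega))
  set r := kmpFall p fl c f f with hr
  have htj : p.take (j + 1) = p.take j ++ [c] := pvTakeSucc p j hjn
  apply le_antisymm
  · by_cases hc : c = p.getD r ""
    · rw [if_pos hc]
      apply pvLe_failSpec p (j + 1) (r + 1) (by omega)
      rw [pvTakeSucc p r (by omega), ← hc, htj]
      exact pvSnocSuffixSnoc _ _ _ ((h2.trans (pvFailSpec_suffix p j)))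
    · rw [if_neg hc, h3.resolve_right hc]
      exact Nat.zero_le _
  · set m := pvFailSpec p (j + 1) with hm
    have hmlt : m < j + 1 := pvFailSpec_lt p (j + 1) (by omega)
    have hmsuf : p.take m <:+ p.take (j + 1) := pvFailSpec_suffix p (j + 1)
    cases hm' : m with
    | zero => exact Nat.zero_le _
    | succ m' =>
      rw [hm'] at hmsuf hmlt
      rw [pvTakeSucc p m' (by omega), htj] at hmsuf
      obtain ⟨hcm, hsufm⟩ := pvSuffixSnocSnoc _ _ _ _ hmsuf
      have hm'f : m' ≤ f := pvLe_failSpec p j m' (by omega) hsufm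
      have hchain : p.take m' <:+ p.take f := pvChain p j m' (by omega) (by omega) hsufm
      have hm'r : m' ≤ r := h4 m' hm'f hchain hcm.symm
      by_cases hc : c = p.getD r ""
      · rw [if_pos hc]; omega
      · rw [if_neg hc]
        have hr0 : r = 0 := h3.resolve_right hc
        exact absurd (by rw [hr0, ← (by omega : m' = 0)]; exact hcm.symm) hc

lemma pvBuildGo_spec (p : List String) (j : Nat) (fl : List Nat) (hj : 1 ≤ j)
    (hlen : fl.length = j) (hF : pvFInv p fl j) :
    pvFInv p (kmpBuildGo p fl (pvFailSpec p j) j) p.length := by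
  induction hd : p.length - j generalizing j fl with
  | zero =>
    rw [kmpBuildGo, dif_neg (by omega)]
    exact pvFInv_mono p fl j p.length hF (by omega)
  | succ d ihd =>
    have hjn : j < p.length := by omega
    rw [kmpBuildGo, dif_pos hjn]
    simp only
    rw [pvBuild_step p j fl hj hjn hF]
    have hF' : pvFInv p (fl ++ [pvFailSpec p (j + 1)]) (j + 1) := by
      intro i hi1 hi2
      rcases Nat.lt_or_ge i (j + 1) with hlt | hge
      · rw [List.getD_append _ _ _ _ (by omega)]
        exact hF i hi1 (by omega)
      · have hij : i = j + 1 := by omega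
        rw [hij, (by omega : j + 1 - 1 = fl.length)]
        simp [List.getD]
    exact ihd (j + 1) (fl ++ [pvFailSpec p (j + 1)]) (by omega) (by simp [hlen]) hF' (by omega)

lemma pvOccLen (p : List String) (hp : p ≠ []) (i : Nat) (t : List String)
    (h : p <+: t.drop i) : i + p.length ≤ t.length := by
  have h1 := h.length_le
  rw [List.length_drop] at h1
  have h2 : 0 < p.length := List.length_pos_of_ne_nil hp
  omega

lemma pvOccPrefix (p T rest : List String) (i : Nat) (hle : i + p.length ≤ T.length)
    (h : p <+: (T ++ rest).drop i) : p <+: T.drop i := by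
  rw [List.prefix_iff_eq_take] at h ⊢
  rw [List.drop_append_of_le_length (by omega)] at h
  rw [List.take_append_of_le_length (by rw [List.length_drop]; omega)] at h
  exact h

lemma pvFindRange_none (P : Nat → Bool) (N : Nat) (h : ∀ i < N, ¬ P i) :
    (List.range N).find? P = none := by
  rw [List.find?_eq_none]
  intro x hx
  exact h x (List.mem_range.mp hx)

lemma pvFindRange_first (P : Nat → Bool) (i N : Nat) (hiN : i < N) (hP : P i)
    (hmin : ∀ k < i, ¬ P k) : (List.range N).find? P = some i := by
  obtain ⟨d, rfl⟩ : ∃ d, N = (i + 1) + d := ⟨N - (i + 1), by omega⟩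
  rw [List.range_add, List.find?_append, List.range_succ, List.find?_append,
    pvFindRange_none P i hmin]
  simp [hP]

lemma pvScanGo_spec (p : List String) (hp : p ≠ []) (fail : List Nat)
    (hF : pvFInv p fail p.length) (done rest : List (Int × String)) (j : Nat)
    (hInv : pvScanInv p (done.map Prod.snd) j) :
    kmpScanGo p fail (done ++ rest) rest done.length j =
      (pvFirstOcc p ((done ++ rest).map Prod.snd)).map
        (fun i => (((done ++ rest).getD i (0, "")).1,
                   ((done ++ rest).getD (i + p.length - 1) (0, "")).1)) := by
  induction rest generalizing done j with
  | nil =>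
    obtain ⟨hjlt, hsuf, hmax, hno⟩ := hInv
    rw [show kmpScanGo p fail (done ++ []) [] done.length j = none from rfl]
    rw [pvFirstOcc, pvFindRange_none]
    · rfl
    · intro i _ hP
      have hocc : p <+: ((done ++ []).map Prod.snd).drop i := of_decide_eq_true hP
      simp only [List.append_nil] at hocc ⊢
      exact hno i (pvOccLen p hp i _ hocc) hocc
  | cons hd rest' ih =>
    obtain ⟨o, l⟩ := hd
    obtain ⟨hjlt, hsuf, hmax, hno⟩ := hInv
    have hn1 : 1 ≤ p.length := List.length_pos_of_ne_nil hp
    set T := done.map Prod.snd with hT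
    have htT : T.length = done.length := by rw [hT, List.length_map]
    obtain ⟨e1, e2, e3⟩ := pvStep_spec p fail l T j hjlt
      (pvFInv_mono p fail p.length j hF (by omega)) hsuf hmax
    rw [show kmpScanGo p fail (done ++ (o, l) :: rest') ((o, l) :: rest') done.length j =
      (if (if l = p.getD (kmpFall p fail l j j) "" then kmpFall p fail l j j + 1
            else kmpFall p fail l j j) = p.length
        then some (((done ++ (o, l) :: rest').getD (done.length + 1 - p.length) (0, "")).1, o)
        else kmpScanGo p fail (done ++ (o, l) :: rest') rest' (done.length + 1)
          (if l = p.getD (kmpFall p fail l j j) "" then kmpFall p fail l j j + 1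
            else kmpFall p fail l j j)) from rfl]
    set j2 := (if l = p.getD (kmpFall p fail l j j) "" then kmpFall p fail l j j + 1
      else kmpFall p fail l j j) with hj2
    by_cases hm : j2 = p.length
    · rw [if_pos hm]
      have hpsuf : p <:+ T ++ [l] := by
        have := e2
        rw [hm, List.take_length] at this
        exact this
      obtain ⟨u, hu⟩ := hpsuf
      have hul : u.length + p.length = done.length + 1 := by
        have := congrArg List.length hu
        simp only [List.length_append, List.length_cons, htT] at this
        simpa using this
      have hfull : (done ++ (o, l) :: rest').map Prod.snd
          = (T ++ [l]) ++ rest'.map Prod.snd := by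
        simp [hT]
      have hocc : p <+: ((done ++ (o, l) :: rest').map Prod.snd).drop (done.length + 1 - p.length) := by
        rw [hfull, ← hu, (by omega : done.length + 1 - p.length = u.length),
          List.append_assoc, List.drop_left]
        exact List.prefix_append p _
      have hmin : ∀ i < done.length + 1 - p.length,
          ¬ p <+: ((done ++ (o, l) :: rest').map Prod.snd).drop i := by
        intro i hi hPi
        have hile : i + p.length ≤ T.length := by omega
        have : p <+: T.drop i := by
          apply pvOccPrefix p T (l :: rest'.map Prod.snd) i hile
          have hfull2 : (done ++ (o, l) :: rest').map Prod.snd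
              = T ++ l :: rest'.map Prod.snd := by simp [hT]
          rw [← hfull2]
          exact hPi
        exact hno i hile this
      rw [pvFirstOcc, pvFindRange_first _ (done.length + 1 - p.length) _ (by simp; omega)
        (decide_eq_true hocc) (fun k hk => by simpa using hmin k hk)]
      simp only [Option.map_some]
      congr 1
      have hidx : done.length + 1 - p.length + p.length - 1 = done.length := by omega
      rw [hidx]
      have : (done ++ (o, l) :: rest').getD done.length (0, "") = (o, l) := by
        simp [List.getD]
      rw [this]
    · rw [if_neg hm]
      have hInv' : pvScanInv p ((done ++ [(o, l)]).map Prod.snd) j2 := by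
        have hmap' : (done ++ [(o, l)]).map Prod.snd = T ++ [l] := by simp [hT]
        rw [hmap']
        refine ⟨by omega, e2, e3, ?_⟩
        intro i hi hPi
        rcases Nat.lt_or_ge (i + p.length) (T.length + 1) with hlt | hge
        · have hile : i + p.length ≤ T.length := by omega
          exact hno i hile (pvOccPrefix p T [l] i hile hPi)
        · have hieq : i + p.length = T.length + 1 := by
            have := pvOccLen p hp i (T ++ [l]) hPi
            simp only [List.length_append, List.length_cons, List.length_nil] at this
            omega
          have hlen : ((T ++ [l]).drop i).length = p.length := by
            rw [List.length_drop]
            simp only [List.length_append, List.length_cons, List.length_nil]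
            omega
          have hpe : p = (T ++ [l]).drop i := by
            rw [List.prefix_iff_eq_take] at hPi
            rw [hPi, ← hlen, List.take_length]
          have : p <:+ T ++ [l] := hpe ▸ List.drop_suffix i (T ++ [l])
          have := e3 p.length (le_refl _) (by rw [List.take_length]; exact this)
          omega
      have := ih (done ++ [(o, l)]) j2 hInv'
      rw [List.append_assoc] at this
      simp only [List.singleton_append, List.length_append, List.length_cons,
        List.length_nil] at this
      rw [(by omega : done.length + 1 = done.length + (0 + 1))]
      exact this

-- A's naive search over the index range, characterized by the first occurrence
lemma pvAGo_map (cs pat : List String) (nn : Int) (l : List Nat) :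
    pvAGo cs pat nn (l.map (fun i : Nat => (i : Int))) =
      match l.find? (fun i : Nat => decide (PySem.List.slice cs (some (i : Int)) (some ((i : Int) + nn)) = pat)) with
      | some i => (i : Int)
      | none => -1 := by
  induction l with
  | nil => rfl
  | cons i rest ih =>
    simp only [List.map_cons, pvAGo]
    by_cases h : PySem.List.slice cs (some (i : Int)) (some ((i : Int) + nn)) = pat
    · rw [if_pos h, List.find?_cons_of_pos (p := fun i : Nat => decide (PySem.List.slice cs (some (i : Int)) (some ((i : Int) + nn)) = pat)) (decide_eq_true h)]
    · rw [if_neg h, List.find?_cons_of_neg (p := fun i : Nat => decide (PySem.List.slice cs (some (i : Int)) (some ((i : Int) + nn)) = pat)) (by simpa using h)]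
      exact ih

lemma pvFindRange_ext (P : Nat → Bool) (K1 K2 : Nat) (h : K1 ≤ K2)
    (hf : ∀ i, K1 ≤ i → i < K2 → ¬ P i) :
    (List.range K2).find? P = (List.range K1).find? P := by
  obtain ⟨k, rfl⟩ := Nat.exists_eq_add_of_le h
  rw [List.range_add, List.find?_append]
  have hnone : (List.find? P (List.map (fun x => K1 + x) (List.range k))) = none := by
    rw [List.find?_eq_none]
    intro x hx
    simp only [List.mem_map, List.mem_range] at hx
    obtain ⟨y, hy, rfl⟩ := hx
    exact hf _ (Nat.le_add_right _ _) (by omega)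
  rw [hnone, Option.or_none]

lemma pvA_char (cs pat : List String) (hp : pat ≠ []) :
    pvAGo cs pat (pat.length : Int)
        (PySem.List.pyRange 0 ((cs.length : Int) - (pat.length : Int) + 1) 1) =
      match pvFirstOcc pat cs with
      | some i => (i : Int)
      | none => -1 := by
  have hn1 : 1 ≤ pat.length := List.length_pos_of_ne_nil hp
  rw [PySem.List.pyRange_one]
  have hmap : (List.range ((((cs.length : Int) - (pat.length : Int) + 1) - 0)).toNat).map
      (fun k : Nat => (0 : Int) + (k : Int))
      = (List.range (((cs.length : Int) - (pat.length : Int) + 1)).toNat).map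
        (fun k : Nat => (k : Int)) := by
    rw [sub_zero]
    exact List.map_congr_left (fun k _ => by omega)
  rw [hmap, pvAGo_map]
  have hpred : (fun i : Nat => decide (PySem.List.slice cs (some (i : Int))
      (some ((i : Int) + (pat.length : Int))) = pat))
      = (fun i : Nat => decide (pat <+: cs.drop i)) := by
    funext i
    apply decide_eq_decide.mpr
    rw [PySem.List.slice_natCast_add, List.prefix_iff_eq_take]
    exact eq_comm
  rw [hpred, pvFirstOcc]
  have hext : (List.range (cs.length + 1)).find? (fun i : Nat => decide (pat <+: cs.drop i))
      = (List.range (((cs.length : Int) - (pat.length : Int) + 1)).toNat).find?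
          (fun i : Nat => decide (pat <+: cs.drop i)) := by
    apply pvFindRange_ext
    · omega
    · intro i hi1 _ hP
      have hocc := pvOccLen pat hp i cs (of_decide_eq_true hP)
      omega
  rw [hext]

-- ===== VERDICT (by name: the statement is the Claim_ definition above) =====
theorem new_structural_edit_spec : Claim_equal_new_structural_edit := by
  intro content search_block replace_block _
  unfold Spec_new_structural_edit
  simp only [new_structural_edit, new_structural_edit_alt]
  by_cases hin : PySem.Str.isIn (PySem.Str.replace search_block "\r\n" "\n")
      (PySem.Str.replace content "\r\n" "\n") = true
  · rw [if_pos hin, if_pos hin]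
  · rw [if_neg hin, if_neg hin]
    rw [PySem.List.foldl_append_if
      (fun p : Int × String => !(PySem.Str.strip p.2 == ""))
      (fun p : Int × String => ((p.1, PySem.Str.strip p.2) : Int × String))
      (PySem.List.enumerate (pvSplitNL (PySem.Str.replace content "\r\n" "\n"))) [],
      List.nil_append]
    set content_lines := pvSplitNL (PySem.Str.replace content "\r\n" "\n") with hcl
    set pairs := ((PySem.List.enumerate content_lines).filter
        (fun p => !(PySem.Str.strip p.2 == ""))).map (fun p => (p.1, PySem.Str.strip p.2)) with hpairs
    set pattern := ((pvSplitNL (PySem.Str.replace search_block "\r\n" "\n")).filter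
        (fun l => !(PySem.Str.strip l == ""))).map PySem.Str.strip with hpat
    clear_value content_lines pairs pattern
    by_cases hpe : pattern = []
    · rw [if_pos hpe, if_pos hpe]
    · rw [if_neg hpe, if_neg hpe]
      have hn1 : 1 ≤ pattern.length := List.length_pos_of_ne_nil hpe
      have hn0 : ¬ (PySem.List.len pattern = 0) := by
        simp only [PySem.List.len_eq]
        omega
      rw [if_neg hn0]
      -- A's search characterized by the first occurrence
      have hlen1 : PySem.List.len pattern = (pattern.length : Int) := by simp
      have hlen2 : PySem.List.len (pairs.map (·.2)) = ((pairs.map (·.2)).length : Int) := by simp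
      rw [hlen1, hlen2, pvA_char (pairs.map (·.2)) pattern hpe]
      -- B's KMP scan characterized by the first occurrence
      have hFinv1 : pvFInv pattern [0] 1 := by
        intro i h1 h2
        have : i = 1 := by omega
        subst this
        rfl
      have hF : pvFInv pattern (kmpBuildGo pattern [0] 0 1) pattern.length := by
        have := pvBuildGo_spec pattern 1 [0] (le_refl _) rfl hFinv1
        rwa [show pvFailSpec pattern 1 = 0 from rfl] at this
      have hInv0 : pvScanInv pattern (([] : List (Int × String)).map Prod.snd) 0 := by
        refine ⟨by omega, by simp, ?_, ?_⟩
        · intro k hk hsufk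
          simp only [List.map_nil, List.suffix_nil] at hsufk
          rcases List.take_eq_nil_iff.mp hsufk with h | h
          · omega
          · exact absurd h hpe
        · intro i hi
          simp only [List.map_nil, List.length_nil] at hi
          omega
      have hscan := pvScanGo_spec pattern hpe (kmpBuildGo pattern [0] 0 1) hF [] pairs 0 hInv0
      simp only [List.nil_append, List.length_nil] at hscan
      rw [hscan]
      -- both sides now case on the same first occurrence
      have heq : (pairs.map (·.2)) = pairs.map Prod.snd := rfl
      rw [heq]
      cases hfo : pvFirstOcc pattern (pairs.map Prod.snd) with
      | none => simp
      | some i =>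
        have hne : ¬ ((i : Int) = -1) := by omega
        have hidx : ((i : Int) + (pattern.length : Int) - 1)
            = ((i + pattern.length - 1 : Nat) : Int) := by omega
        rw [hidx]
        simp only [Option.map_some, ne_eq, hne, not_false_eq_true, if_true,
          PySem.List.pyGetD_natCast]
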